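-- pv_equiv track=rewrite | github.com/pypi-data/pypi-mirror-373 | packages/diskii/diskii-0.2.0-py3-none-any.whl/diskii/basic/common.py | extract_numeric_literal
-- ===== SOURCE A (Python) =====
-- from typing import List, Tuple, Dict, Any, Optional
--
-- def extract_numeric_literal(text: str, start: int) -> Tuple[str, int]:
--     """Extract numeric literal from text starting at position.
--
--     Args:
--         text: Source text
--         start: Starting position
--
--     Returns:
--         Tuple of (numeric_string, characters_consumed)
--     """
--     i = start
--     has_decimal = False
--     has_exponent = False
--
--     # Handle negative sign
--     if i < len(text) and text[i] == '-':
--         i += 1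
--
--     # Extract digits and decimal point
--     while i < len(text):
--         char = text[i]
--
--         if char.isdigit():
--             i += 1
--         elif char == '.' and not has_decimal and not has_exponent:
--             has_decimal = True
--             i += 1
--         elif char.upper() == 'E' and not has_exponent and i > start:
--             has_exponent = True
--             i += 1
--             # Handle exponent sign
--             if i < len(text) and text[i] in '+-':
--                 i += 1
--         else:
--             break
--
--     return text[start:i], i - start
-- ===== SOURCE B (Python) =====
-- def extract_numeric_literal(text, start):
--     """Sequential parse phases: sign, integer digits, fraction, exponent."""
--     n = len(text)
--     if start < 0:
--         return "", 0
--     i = start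
--     # optional leading minus
--     if i < n and text[i] == '-':
--         i += 1
--     # integer digits
--     while i < n and text[i].isdigit():
--         i += 1
--     # fractional part
--     if i < n and text[i] == '.':
--         i += 1
--         while i < n and text[i].isdigit():
--             i += 1
--     # exponent part (only if something was consumed already)
--     if start < i and i < n and text[i] in 'eE':
--         i += 1
--         if i < n and text[i] in '+-':
--             i += 1
--         while i < n and text[i].isdigit():
--             i += 1
--     return text[start:i], i - start
-- ===== Notes on version B (the rewrite author's own statement) =====
-- stated objective: simpler
-- what changed: Replaced A's single flag-driven while loop (has_decimal/has_exponent state booleans) by sequential parse phases (sign, integer digits, fraction, exponent), so the flags disappear; same O(n) cost.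
-- intended difference: For negative start with -len(text) <= start < 0 where the wrapped-around character text[start] is a digit, '-' or '.', A's negative-index wraparound accidentally parses from the end of the string and returns a nonempty slice with a positive consumed count; B returns the empty string with count 0, the intended value for an out-of-range position. — e.g. on extract_numeric_literal("1", -1): A returns ("1", 2), B returns ("", 0)
import Mathlib
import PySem

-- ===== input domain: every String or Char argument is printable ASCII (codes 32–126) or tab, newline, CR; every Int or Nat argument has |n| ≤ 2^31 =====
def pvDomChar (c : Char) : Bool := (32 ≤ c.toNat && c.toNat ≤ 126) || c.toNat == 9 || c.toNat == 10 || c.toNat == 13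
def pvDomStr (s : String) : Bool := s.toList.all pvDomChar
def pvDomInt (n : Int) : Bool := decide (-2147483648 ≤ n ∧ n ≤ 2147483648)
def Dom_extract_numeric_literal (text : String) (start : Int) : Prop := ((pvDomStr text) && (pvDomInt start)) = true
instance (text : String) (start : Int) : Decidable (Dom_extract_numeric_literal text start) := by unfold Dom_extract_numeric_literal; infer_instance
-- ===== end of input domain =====

-- B replaces A's flag-driven while loop by sequential parse phases (sign, integer digits,
-- fraction, exponent); same O(n) cost, the has_decimal/has_exponent flags disappear (objective: simpler).

-- ===== PORT A =====
-- helper for the inline step `if i < len(text) and text[i] in '+-': i += 1`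
def aExpSign (cs : List Char) (j : Int) : Int :=
  if j < (cs.length : Int) ∧ (PySem.List.pyGet? cs j = some '+' ∨ PySem.List.pyGet? cs j = some '-') then j + 1
  else j

-- A's flag-driven while loop; fuel = distance to the end of the string (i grows every iteration,
-- and once i ≥ len both the Python loop and the fuel-out case return i).
def aLoop (cs : List Char) (start : Int) (fuel : Nat) (i : Int) (hd he : Bool) : Int :=
  match fuel with
  | 0 => i
  | fuel + 1 =>
    if i < (cs.length : Int) then
      match PySem.List.pyGet? cs i with
      | none => i      -- Python raises IndexError here (reachable only for start < -len, outside Pre_)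
      | some c =>
        if PySem.Chars.isdigit c then aLoop cs start fuel (i + 1) hd he
        else if c = '.' ∧ hd = false ∧ he = false then aLoop cs start fuel (i + 1) true he
        else if PySem.Chars.upperChar c = 'E' ∧ he = false ∧ start < i then
          aLoop cs start fuel (aExpSign cs (i + 1)) hd true
        else i
    else i

def extract_numeric_literal (text : String) (start : Int) : String × Int :=
  let cs := text.toList
  let i0 := if start < (cs.length : Int) ∧ PySem.List.pyGet? cs start = some '-' then start + 1 else start
  let i1 := aLoop cs start ((cs.length : Int) - i0).toNat i0 false false
  (String.ofList (PySem.List.slice cs (some start) (some i1)), i1 - start)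

-- ===== PORT B =====
-- `while i < n and text[i].isdigit(): i += 1`; fuel = distance to the end of the string
def bSkipDigits (cs : List Char) (fuel : Nat) (i : Int) : Int :=
  match fuel with
  | 0 => i
  | fuel + 1 =>
    if i < (cs.length : Int) ∧ (PySem.List.pyGet? cs i).any PySem.Chars.isdigit = true then
      bSkipDigits cs fuel (i + 1)
    else i

def extract_numeric_literal_alt (text : String) (start : Int) : String × Int :=
  let cs := text.toList
  let n : Int := cs.length
  if start < 0 then ("", 0)
  else
    -- optional leading minus
    let i1 := if start < n ∧ PySem.List.pyGet? cs start = some '-' then start + 1 else start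
    -- integer digits
    let i2 := bSkipDigits cs (n - i1).toNat i1
    -- fractional part
    let i3 := if i2 < n ∧ PySem.List.pyGet? cs i2 = some '.' then bSkipDigits cs (n - (i2 + 1)).toNat (i2 + 1) else i2
    -- exponent part (only if something was consumed already)
    let i4 :=
      if start < i3 ∧ i3 < n ∧ (PySem.List.pyGet? cs i3 = some 'e' ∨ PySem.List.pyGet? cs i3 = some 'E') then
        let j := i3 + 1
        let j2 := if j < n ∧ (PySem.List.pyGet? cs j = some '+' ∨ PySem.List.pyGet? cs j = some '-') then j + 1 else j
        bSkipDigits cs (n - j2).toNat j2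
      else i3
    (String.ofList (PySem.List.slice cs (some start) (some i4)), i4 - start)

-- ===== PRECONDITION & SPEC =====
-- Pre_ excludes exactly start < -len(text), where Python A raises IndexError on text[start].
def Pre_extract_numeric_literal (text : String) (start : Int) : Prop :=
  -(text.toList.length : Int) ≤ start
instance (text : String) (start : Int) : Decidable (Pre_extract_numeric_literal text start) := by
  unfold Pre_extract_numeric_literal; infer_instance

def pvWitness_extract_numeric_literal : String × Int := ("1.5e3", 0)

-- For negative start with -len(text) ≤ start < 0 where the wrapped-around character text[start] is a
-- digit, '-' or '.', A's negative-index wraparound accidentally parses from the end of the string and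
-- returns a nonempty slice with a positive consumed count; B returns the empty string with count 0,
-- the intended value for an out-of-range position.
def D_extract_numeric_literal (text : String) (start : Int) : Prop :=
  start < 0 ∧
    (PySem.List.pyGet? text.toList start).any
      (fun c => PySem.Chars.isdigit c || c == '-' || c == '.') = true
instance (text : String) (start : Int) : Decidable (D_extract_numeric_literal text start) := by
  unfold D_extract_numeric_literal; infer_instance

def Spec_extract_numeric_literal (text : String) (start : Int) (out : String × Int) : Prop :=
  ¬ D_extract_numeric_literal text start → out = extract_numeric_literal_alt text start
instance (text : String) (start : Int) (out : String × Int) : Decidable (Spec_extract_numeric_literal text start out) := by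
  unfold Spec_extract_numeric_literal; infer_instance

def pvDiffWitness_extract_numeric_literal : String × Int := ("1", -1)
def pvDiffWitnessOut_extract_numeric_literal : (String × Int) × (String × Int) := (("1", 2), ("", 0))

-- ===== CLAIM (what is proved, stated in full; the proofs are below) =====
def Claim_unchanged_extract_numeric_literal : Prop := ∀ (text : String) (start : Int), Dom_extract_numeric_literal text start → Pre_extract_numeric_literal text start → Spec_extract_numeric_literal text start (extract_numeric_literal text start)
def Claim_changed_extract_numeric_literal : Prop := Dom_extract_numeric_literal (pvDiffWitness_extract_numeric_literal.1) (pvDiffWitness_extract_numeric_literal.2) ∧ Pre_extract_numeric_literal (pvDiffWitness_extract_numeric_literal.1) (pvDiffWitness_extract_numeric_literal.2) ∧ D_extract_numeric_literal (pvDiffWitness_extract_numeric_literal.1) (pvDiffWitness_extract_numeric_literal.2) ∧ extract_numeric_literal (pvDiffWitness_extract_numeric_literal.1) (pvDiffWitness_extract_numeric_literal.2) = pvDiffWitnessOut_extract_numeric_literal.1 ∧ extract_numeric_literal_alt (pvDiffWitness_extract_numeric_literal.1) (pvDiffWitness_extract_numeric_literal.2) = pvDiffWitnessOut_extract_numeric_literal.2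 ∧ pvDiffWitnessOut_extract_numeric_literal.1 ≠ pvDiffWitnessOut_extract_numeric_literal.2
def Claim_exact_extract_numeric_literal : Prop := ∀ (text : String) (start : Int), Dom_extract_numeric_literal text start → Pre_extract_numeric_literal text start → D_extract_numeric_literal text start → extract_numeric_literal text start ≠ extract_numeric_literal_alt text start

-- ===== LEMMAS AND PROOFS =====

-- B's "true" digit skip: bSkipDigits with exactly enough fuel (the form the port calls it in)
def bF (cs : List Char) (i : Int) : Int := bSkipDigits cs ((cs.length : Int) - i).toNat i

-- B's tail after the integer-digit phase, phrased from an arbitrary index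
def fracExp (cs : List Char) (start i : Int) : Int :=
  let j := bF cs i
  if start < j ∧ j < (cs.length : Int) ∧ (PySem.List.pyGet? cs j = some 'e' ∨ PySem.List.pyGet? cs j = some 'E') then
    bF cs (aExpSign cs (j + 1))
  else j

def intRest (cs : List Char) (start i : Int) : Int :=
  let j := bF cs i
  if j < (cs.length : Int) ∧ PySem.List.pyGet? cs j = some '.' then fracExp cs start (j + 1)
  else if start < j ∧ j < (cs.length : Int) ∧ (PySem.List.pyGet? cs j = some 'e' ∨ PySem.List.pyGet? cs j = some 'E') then
    bF cs (aExpSign cs (j + 1))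
  else j

lemma char_eq_of_toNat (a b : Char) (h : a.toNat = b.toNat) : a = b := by
  rcases a with ⟨⟨a⟩, ha⟩; rcases b with ⟨⟨b⟩, hb⟩
  simp [Char.toNat] at h
  simp_all
  exact BitVec.eq_of_toNat_eq h

lemma upperE_iff (c : Char) : PySem.Chars.upperChar c = 'E' ↔ (c = 'e' ∨ c = 'E') := by
  simp only [PySem.Chars.upperChar, PySem.Chars.islower]
  split
  · rename_i h
    simp only [Bool.and_eq_true, decide_eq_true_eq] at h
    obtain ⟨h1, h2⟩ := h
    have h1' : 'a'.toNat ≤ c.toNat := h1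
    have h2' : c.toNat ≤ 'z'.toNat := h2
    have hval : (c.toNat - 32).isValidChar := by
      left; simp_all; omega
    constructor
    · intro he
      have hn : (Char.ofNat (c.toNat - 32)).toNat = 'E'.toNat := by rw [he]
      rw [show (Char.ofNat (c.toNat - 32)).toNat = c.toNat - 32 from by simp [Char.ofNat, hval]] at hn
      left
      exact char_eq_of_toNat _ _ (by simp_all; omega)
    · rintro (rfl | rfl)
      · decide
      · exact absurd h1' (by decide)
  · rename_i h
    constructor
    · intro he; right; exact he
    · rintro (rfl | rfl)
      · exact absurd h (by decide)
      · rfl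

lemma aExpSign_ge (cs : List Char) (j : Int) : j ≤ aExpSign cs j := by
  unfold aExpSign; split <;> omega

lemma aLoop_ge (cs : List Char) (start : Int) :
    ∀ (fuel : Nat) (i : Int) (hd he : Bool), i ≤ aLoop cs start fuel i hd he := by
  intro fuel
  induction fuel with
  | zero => intro i hd he; simp [aLoop]
  | succ fuel ih =>
    intro i hd he
    rw [aLoop]
    split
    · rcases PySem.List.pyGet? cs i with _ | c
      · exact le_refl i
      · simp only []
        split_ifs with h1 h2 h3
        · exact le_trans (by omega) (ih (i + 1) hd he)
        · exact le_trans (by omega) (ih (i + 1) true he)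
        · exact le_trans (le_trans (by omega) (aExpSign_ge cs (i + 1))) (ih _ hd true)
        · exact le_refl i
    · exact le_refl i

lemma bSkip_fuel (cs : List Char) :
    ∀ (f1 f2 : Nat) (i : Int),
      ((cs.length : Int) - i).toNat ≤ f1 → ((cs.length : Int) - i).toNat ≤ f2 →
      bSkipDigits cs f1 i = bSkipDigits cs f2 i := by
  intro f1
  induction f1 with
  | zero =>
    intro f2 i h1 h2
    cases f2 with
    | zero => rfl
    | succ f2 =>
      have hc : ¬(i < (cs.length : Int) ∧ (PySem.List.pyGet? cs i).any PySem.Chars.isdigit = true) := by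
        rintro ⟨hlt, -⟩; omega
      rw [bSkipDigits, bSkipDigits, if_neg hc]
  | succ f1 ih =>
    intro f2 i h1 h2
    cases f2 with
    | zero =>
      have hc : ¬(i < (cs.length : Int) ∧ (PySem.List.pyGet? cs i).any PySem.Chars.isdigit = true) := by
        rintro ⟨hlt, -⟩; omega
      rw [bSkipDigits, bSkipDigits, if_neg hc]
    | succ f2 =>
      rw [bSkipDigits, bSkipDigits]
      split
      · exact ih f2 (i + 1) (by omega) (by omega)
      · rfl

lemma bF_unfold (cs : List Char) (i : Int) :
    bF cs i =
      if i < (cs.length : Int) ∧ (PySem.List.pyGet? cs i).any PySem.Chars.isdigit = true then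
        bF cs (i + 1)
      else i := by
  unfold bF
  rcases h : ((cs.length : Int) - i).toNat with _ | k
  · have hc : ¬(i < (cs.length : Int) ∧ (PySem.List.pyGet? cs i).any PySem.Chars.isdigit = true) := by
      rintro ⟨hlt, -⟩; omega
    rw [bSkipDigits, if_neg hc]
  · rw [bSkipDigits]
    split
    · exact bSkip_fuel cs k (((cs.length : Int) - (i + 1)).toNat) (i + 1) (by omega) (le_refl _)
    · rfl

lemma bF_stop (cs : List Char) (i : Int)
    (h : ¬(i < (cs.length : Int) ∧ (PySem.List.pyGet? cs i).any PySem.Chars.isdigit = true)) :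
    bF cs i = i := by
  rw [bF_unfold, if_neg h]

lemma bF_step (cs : List Char) (i : Int)
    (h : i < (cs.length : Int) ∧ (PySem.List.pyGet? cs i).any PySem.Chars.isdigit = true) :
    bF cs i = bF cs (i + 1) := by
  rw [bF_unfold, if_pos h]

lemma fracExp_eq (cs : List Char) (start i : Int) :
    fracExp cs start i =
      if start < bF cs i ∧ bF cs i < (cs.length : Int) ∧
          (PySem.List.pyGet? cs (bF cs i) = some 'e' ∨ PySem.List.pyGet? cs (bF cs i) = some 'E') then
        bF cs (aExpSign cs (bF cs i + 1))
      else bF cs i := rfl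

lemma intRest_eq (cs : List Char) (start i : Int) :
    intRest cs start i =
      if bF cs i < (cs.length : Int) ∧ PySem.List.pyGet? cs (bF cs i) = some '.' then
        fracExp cs start (bF cs i + 1)
      else if start < bF cs i ∧ bF cs i < (cs.length : Int) ∧
          (PySem.List.pyGet? cs (bF cs i) = some 'e' ∨ PySem.List.pyGet? cs (bF cs i) = some 'E') then
        bF cs (aExpSign cs (bF cs i + 1))
      else bF cs i := rfl

lemma L_exp (cs : List Char) (start : Int) :
    ∀ (fuel : Nat) (i : Int) (hd : Bool),
      aLoop cs start fuel i hd true = bSkipDigits cs fuel i := by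
  intro fuel
  induction fuel with
  | zero => intro i hd; rfl
  | succ fuel ih =>
    intro i hd
    rw [aLoop, bSkipDigits]
    by_cases hlt : i < (cs.length : Int)
    · rw [if_pos hlt]
      rcases hg : PySem.List.pyGet? cs i with _ | c
      · rw [if_neg (show ¬(i < (cs.length : Int) ∧
            Option.any PySem.Chars.isdigit (none : Option Char) = true) from by simp)]
      · simp only []
        by_cases hdig : PySem.Chars.isdigit c = true
        · rw [if_pos hdig,
            if_pos (show i < (cs.length : Int) ∧
              Option.any PySem.Chars.isdigit (some c) = true from ⟨hlt, by simpa using hdig⟩)]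
          exact ih (i + 1) hd
        · rw [if_neg hdig]
          rw [if_neg (show ¬(i < (cs.length : Int) ∧
            Option.any PySem.Chars.isdigit (some c) = true) from by
              rintro ⟨-, h⟩; exact hdig (by simpa using h))]
          simp only [Bool.true_eq_false, eq_self_iff_true, and_true, true_and, and_false, false_and,
          reduceIte]
    · rw [if_neg hlt, if_neg (by rintro ⟨h, -⟩; exact hlt h)]

lemma L_frac (cs : List Char) (start : Int) :
    ∀ (fuel : Nat) (i : Int),
      ((cs.length : Int) - i).toNat ≤ fuel → start ≤ i →
      aLoop cs start fuel i true false = fracExp cs start i := by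
  intro fuel
  induction fuel with
  | zero =>
    intro i hf hs
    have hni : (cs.length : Int) ≤ i := by omega
    have hstop : bF cs i = i := bF_stop cs i (by rintro ⟨hlt, -⟩; omega)
    show i = fracExp cs start i
    rw [fracExp_eq, hstop,
      if_neg (show ¬(start < i ∧ i < (cs.length : Int) ∧
        (PySem.List.pyGet? cs i = some 'e' ∨ PySem.List.pyGet? cs i = some 'E')) from by
          rintro ⟨-, hlt, -⟩; omega)]
  | succ fuel ih =>
    intro i hf hs
    rw [aLoop]
    by_cases hlt : i < (cs.length : Int)
    · rw [if_pos hlt]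
      rcases hg : PySem.List.pyGet? cs i with _ | c
      · have hstop : bF cs i = i := bF_stop cs i (by rintro ⟨-, h⟩; rw [hg] at h; simp at h)
        rw [fracExp_eq, hstop,
          if_neg (show ¬(start < i ∧ i < (cs.length : Int) ∧
            (PySem.List.pyGet? cs i = some 'e' ∨ PySem.List.pyGet? cs i = some 'E')) from by
              rintro ⟨-, -, h | h⟩ <;> (rw [hg] at h; simp at h))]
      · simp only []
        simp only [Bool.true_eq_false, eq_self_iff_true, and_true, true_and, and_false, false_and,
          reduceIte]
        by_cases hdig : PySem.Chars.isdigit c = true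
        · rw [if_pos hdig, ih (i + 1) (by omega) (by omega), fracExp_eq, fracExp_eq,
            bF_step cs i ⟨hlt, by rw [hg]; simpa using hdig⟩]
        · have hstop : bF cs i = i :=
            bF_stop cs i (by rintro ⟨-, h⟩; rw [hg] at h; exact hdig (by simpa using h))
          rw [if_neg hdig]
          by_cases hE : PySem.Chars.upperChar c = 'E' ∧ start < i
          · have hb : bSkipDigits cs fuel (aExpSign cs (i + 1)) = bF cs (aExpSign cs (i + 1)) := by
              have := aExpSign_ge cs (i + 1)
              exact bSkip_fuel cs fuel _ _ (by omega) (le_refl _)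
            rw [if_pos hE, L_exp cs start fuel (aExpSign cs (i + 1)) true, hb, fracExp_eq, hstop,
              if_pos (show start < i ∧ i < (cs.length : Int) ∧
                (PySem.List.pyGet? cs i = some 'e' ∨ PySem.List.pyGet? cs i = some 'E') from
                ⟨hE.2, hlt, by rw [hg]; rcases (upperE_iff c).mp hE.1 with h | h <;> simp [h]⟩)]
          · rw [if_neg hE, fracExp_eq, hstop,
              if_neg (show ¬(start < i ∧ i < (cs.length : Int) ∧
                (PySem.List.pyGet? cs i = some 'e' ∨ PySem.List.pyGet? cs i = some 'E')) from by
                  rintro ⟨hsi, -, h | h⟩ <;>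
                    (rw [hg] at h; simp only [Option.some.injEq] at h; subst h;
                      exact hE ⟨by rw [upperE_iff]; simp, hsi⟩))]
    · have hstop : bF cs i = i := bF_stop cs i (by rintro ⟨h, -⟩; exact hlt h)
      rw [if_neg hlt, fracExp_eq, hstop,
        if_neg (show ¬(start < i ∧ i < (cs.length : Int) ∧
          (PySem.List.pyGet? cs i = some 'e' ∨ PySem.List.pyGet? cs i = some 'E')) from by
            rintro ⟨-, h, -⟩; exact hlt h)]

lemma L_int (cs : List Char) (start : Int) :
    ∀ (fuel : Nat) (i : Int),
      ((cs.length : Int) - i).toNat ≤ fuel → start ≤ i →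
      aLoop cs start fuel i false false = intRest cs start i := by
  intro fuel
  induction fuel with
  | zero =>
    intro i hf hs
    have hni : (cs.length : Int) ≤ i := by omega
    have hstop : bF cs i = i := bF_stop cs i (by rintro ⟨hlt, -⟩; omega)
    show i = intRest cs start i
    rw [intRest_eq, hstop,
      if_neg (show ¬((i : Int) < (cs.length : Int) ∧ PySem.List.pyGet? cs i = some '.') from by
        rintro ⟨hlt, -⟩; omega),
      if_neg (show ¬(start < i ∧ i < (cs.length : Int) ∧
        (PySem.List.pyGet? cs i = some 'e' ∨ PySem.List.pyGet? cs i = some 'E')) from by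
          rintro ⟨-, hlt, -⟩; omega)]
  | succ fuel ih =>
    intro i hf hs
    rw [aLoop]
    by_cases hlt : i < (cs.length : Int)
    · rw [if_pos hlt]
      rcases hg : PySem.List.pyGet? cs i with _ | c
      · have hstop : bF cs i = i := bF_stop cs i (by rintro ⟨-, h⟩; rw [hg] at h; simp at h)
        rw [intRest_eq, hstop,
          if_neg (show ¬((i : Int) < (cs.length : Int) ∧ PySem.List.pyGet? cs i = some '.') from by
            rintro ⟨-, h⟩; rw [hg] at h; simp at h),
          if_neg (show ¬(start < i ∧ i < (cs.length : Int) ∧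
            (PySem.List.pyGet? cs i = some 'e' ∨ PySem.List.pyGet? cs i = some 'E')) from by
              rintro ⟨-, -, h | h⟩ <;> (rw [hg] at h; simp at h))]
      · simp only []
        simp only [Bool.true_eq_false, eq_self_iff_true, and_true, true_and, and_false, false_and,
          reduceIte]
        by_cases hdig : PySem.Chars.isdigit c = true
        · rw [if_pos hdig, ih (i + 1) (by omega) (by omega), intRest_eq, intRest_eq,
            bF_step cs i ⟨hlt, by rw [hg]; simpa using hdig⟩]
        · have hstop : bF cs i = i :=
            bF_stop cs i (by rintro ⟨-, h⟩; rw [hg] at h; exact hdig (by simpa using h))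
          rw [if_neg hdig]
          by_cases hdot : c = '.'
          · rw [if_pos hdot, L_frac cs start fuel (i + 1) (by omega) (by omega), intRest_eq, hstop,
              if_pos (show (i : Int) < (cs.length : Int) ∧ PySem.List.pyGet? cs i = some '.' from
                ⟨hlt, by rw [hg, hdot]⟩)]
          · rw [if_neg hdot]
            by_cases hE : PySem.Chars.upperChar c = 'E' ∧ start < i
            · have hb : bSkipDigits cs fuel (aExpSign cs (i + 1)) = bF cs (aExpSign cs (i + 1)) := by
                have := aExpSign_ge cs (i + 1)
                exact bSkip_fuel cs fuel _ _ (by omega) (le_refl _)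
              rw [if_pos hE, L_exp cs start fuel (aExpSign cs (i + 1)) false, hb, intRest_eq, hstop,
                if_neg (show ¬((i : Int) < (cs.length : Int) ∧ PySem.List.pyGet? cs i = some '.') from by
                  rintro ⟨-, h⟩; rw [hg] at h; simp only [Option.some.injEq] at h; exact hdot h),
                if_pos (show start < i ∧ i < (cs.length : Int) ∧
                  (PySem.List.pyGet? cs i = some 'e' ∨ PySem.List.pyGet? cs i = some 'E') from
                  ⟨hE.2, hlt, by rw [hg]; rcases (upperE_iff c).mp hE.1 with h | h <;> simp [h]⟩)]
            · rw [if_neg hE, intRest_eq, hstop,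
                if_neg (show ¬((i : Int) < (cs.length : Int) ∧ PySem.List.pyGet? cs i = some '.') from by
                  rintro ⟨-, h⟩; rw [hg] at h; simp only [Option.some.injEq] at h; exact hdot h),
                if_neg (show ¬(start < i ∧ i < (cs.length : Int) ∧
                  (PySem.List.pyGet? cs i = some 'e' ∨ PySem.List.pyGet? cs i = some 'E')) from by
                    rintro ⟨hsi, -, h | h⟩ <;>
                      (rw [hg] at h; simp only [Option.some.injEq] at h; subst h;
                        exact hE ⟨by rw [upperE_iff]; simp, hsi⟩))]
    · have hstop : bF cs i = i := bF_stop cs i (by rintro ⟨h, -⟩; exact hlt h)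
      rw [if_neg hlt, intRest_eq, hstop,
        if_neg (show ¬((i : Int) < (cs.length : Int) ∧ PySem.List.pyGet? cs i = some '.') from by
          rintro ⟨h, -⟩; exact hlt h),
        if_neg (show ¬(start < i ∧ i < (cs.length : Int) ∧
          (PySem.List.pyGet? cs i = some 'e' ∨ PySem.List.pyGet? cs i = some 'E')) from by
            rintro ⟨-, h, -⟩; exact hlt h)]

lemma slice_self (cs : List Char) (a : Int) : PySem.List.slice cs (some a) (some a) = [] := by
  have h := PySem.List.length_slice cs a a
  exact List.eq_nil_of_length_eq_zero (by rw [h]; omega)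

-- the shared sign step `if i < len(text) and text[i] == '-': i += 1`
def pSign (text : String) (start : Int) : Int :=
  if start < (text.toList.length : Int) ∧ PySem.List.pyGet? text.toList start = some '-' then start + 1
  else start

-- A's port, written as one equation (definitional)
lemma a_eq (text : String) (start : Int) :
    extract_numeric_literal text start =
      (String.ofList (PySem.List.slice text.toList (some start)
          (some (aLoop text.toList start (((text.toList.length : Int) - pSign text start).toNat) (pSign text start) false false))),
        aLoop text.toList start (((text.toList.length : Int) - pSign text start).toNat) (pSign text start) false false - start) := rfl

-- B's tail (phases after the sign step), mirroring the port's structure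
def bodyB (cs : List Char) (start i1 : Int) : Int :=
  let i3 := if bF cs i1 < (cs.length : Int) ∧ PySem.List.pyGet? cs (bF cs i1) = some '.' then
      bF cs (bF cs i1 + 1) else bF cs i1
  if start < i3 ∧ i3 < (cs.length : Int) ∧
      (PySem.List.pyGet? cs i3 = some 'e' ∨ PySem.List.pyGet? cs i3 = some 'E') then
    bF cs (aExpSign cs (i3 + 1))
  else i3

-- B's port for start ≥ 0, written as one equation (definitional after dropping the early return)
lemma alt_nonneg (text : String) (start : Int) (h : 0 ≤ start) :
    extract_numeric_literal_alt text start =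
      (String.ofList (PySem.List.slice text.toList (some start) (some (bodyB text.toList start (pSign text start)))),
        bodyB text.toList start (pSign text start) - start) := by
  show (if start < 0 then ((String.ofList [] : String), (0 : Int)) else _) = _
  rw [if_neg (show ¬ start < 0 by omega)]
  rfl

-- the phase chain equals the loop characterisation intRest
lemma bodyB_eq_intRest (cs : List Char) (start i1 : Int) : bodyB cs start i1 = intRest cs start i1 := by
  unfold bodyB
  by_cases hdot : bF cs i1 < (cs.length : Int) ∧ PySem.List.pyGet? cs (bF cs i1) = some '.'
  · rw [if_pos hdot, intRest_eq, if_pos hdot, fracExp_eq]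
  · rw [if_neg hdot, intRest_eq, if_neg hdot]

-- ===== VERDICT (by name: the statement is the Claim_ definition above) =====
theorem extract_numeric_literal_spec : Claim_unchanged_extract_numeric_literal := by
  intro text start hDom hPre
  intro hnD
  by_cases hs : 0 ≤ start
  · -- main case: both ports compute the same final index via L_int
    rw [a_eq, alt_nonneg text start hs, bodyB_eq_intRest]
    have hsi0 : start ≤ pSign text start := by unfold pSign; split <;> omega
    rw [L_int text.toList start (((text.toList.length : Int) - pSign text start).toNat)
      (pSign text start) (le_refl _) hsi0]
  · -- negative start: Pre_ gives -len ≤ start; ¬D_ means the wrapped char starts no literal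
    push_neg at hs
    unfold Pre_extract_numeric_literal at hPre
    unfold D_extract_numeric_literal at hnD
    have hlen : 0 < (text.toList.length : Int) := by omega
    have hrange : PySem.Raise.InRange text.toList.length start := ⟨by omega, by omega⟩
    rcases hg : PySem.List.pyGet? text.toList start with _ | c
    · exact absurd ((PySem.List.pyGet?_eq_none_iff text.toList start).mp hg) (by simpa using hrange)
    · have hPc : ¬ (PySem.Chars.isdigit c || c == '-' || c == '.') = true := by
        intro hP
        exact hnD ⟨hs, by rw [hg]; simpa using hP⟩
      simp only [Bool.or_eq_true, beq_iff_eq] at hPc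
      push_neg at hPc
      obtain ⟨⟨hnd, hnm⟩, hnp⟩ := hPc
      have hsgn : pSign text start = start := by
        unfold pSign
        rw [if_neg]
        rintro ⟨-, h⟩; rw [hg] at h; simp only [Option.some.injEq] at h; exact hnm h
      rw [a_eq, hsgn]
      obtain ⟨k, hk⟩ : ∃ k, ((text.toList.length : Int) - start).toNat = k + 1 :=
        ⟨((text.toList.length : Int) - start).toNat - 1, by omega⟩
      rw [hk, aLoop, if_pos (show start < (text.toList.length : Int) by omega), hg]
      simp only []
      simp only [Bool.true_eq_false, eq_self_iff_true, and_true, true_and, and_false, false_and,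
        reduceIte]
      rw [if_neg hnd, if_neg hnp,
        if_neg (show ¬(PySem.Chars.upperChar c = 'E' ∧ start < start) from by rintro ⟨-, h⟩; omega),
        slice_self]
      show _ = (if start < 0 then ((String.ofList [] : String), (0 : Int)) else _)
      rw [if_pos hs]
      norm_num

theorem extract_numeric_literal_changed : Claim_changed_extract_numeric_literal := by
  unfold Claim_changed_extract_numeric_literal; decide

theorem extract_numeric_literal_tight : Claim_exact_extract_numeric_literal := by
  intro text start hDom hPre hD
  unfold D_extract_numeric_literal at hD
  obtain ⟨hs, hP⟩ := hD
  rcases hg : PySem.List.pyGet? text.toList start with _ | c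
  · rw [hg] at hP; simp at hP
  · rw [hg] at hP; simp only [Option.any_some, Bool.or_eq_true, beq_iff_eq] at hP
    -- A consumes at least one character, so its count is ≥ 1; B's count is 0
    have hlen : start < (text.toList.length : Int) := by
      unfold Pre_extract_numeric_literal at hPre; omega
    have hA2 : 1 ≤ (extract_numeric_literal text start).2 := by
      rw [a_eq]
      show 1 ≤ aLoop text.toList start _ (pSign text start) false false - start
      by_cases hm : c = '-'
      · have hsgn : pSign text start = start + 1 := by
          unfold pSign
          rw [if_pos (show start < (text.toList.length : Int) ∧
            PySem.List.pyGet? text.toList start = some '-' from ⟨hlen, by rw [hg, hm]⟩)]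
        rw [hsgn]
        have := aLoop_ge text.toList start
          (((text.toList.length : Int) - (start + 1)).toNat) (start + 1) false false
        omega
      · have hsgn : pSign text start = start := by
          unfold pSign
          rw [if_neg]
          rintro ⟨-, h⟩; rw [hg] at h; simp only [Option.some.injEq] at h; exact hm h
        rw [hsgn]
        obtain ⟨k, hk⟩ : ∃ k, ((text.toList.length : Int) - start).toNat = k + 1 :=
          ⟨((text.toList.length : Int) - start).toNat - 1, by omega⟩
        rw [hk, aLoop, if_pos hlen, hg]
        simp only []
        simp only [Bool.true_eq_false, eq_self_iff_true, and_true, true_and, and_false, false_and,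
          reduceIte]
        rcases hP with (hP | hP) | hP
        · rw [if_pos hP]
          have := aLoop_ge text.toList start k (start + 1) false false
          omega
        · exact absurd hP hm
        · have hnd : ¬ PySem.Chars.isdigit c = true := by rw [hP]; decide
          rw [if_neg hnd, if_pos hP]
          have := aLoop_ge text.toList start k (start + 1) true false
          omega
    have hB2 : (extract_numeric_literal_alt text start).2 = 0 := by
      show (if start < 0 then ((String.ofList [] : String), (0 : Int)) else _).2 = 0
      rw [if_pos hs]
    intro h
    rw [h] at hA2
    omega
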